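-- pv_equiv track=rewrite | github.com/Hritikshah02/vision_pipeline | prompt_to_json_5.py | normalize_prompt
-- ===== SOURCE A (Python) =====
-- def normalize_prompt(text):
--     """Normalize prompt text for better matching"""
--     # Convert to lowercase
--     text = text.lower().strip()
--
--     # Remove punctuation at the end
--     if text.endswith('.') or text.endswith('?') or text.endswith('!'):
--         text = text[:-1]
--
--     # Remove extra spaces
--     text = ' '.join(text.split())
--
--     # Replace specific terms for consistency
--     replacements = {
--         "objects": "object",
--         "estimate": "detect",
--         "physical properties": "physical property",
--         "identify": "detect",
--         "continuously": "continuous"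
--     }
--
--     for old, new in replacements.items():
--         text = text.replace(old, new)
--
--     return text
-- ===== SOURCE B (Python) =====
-- def normalize_prompt(text):
--     """Normalize prompt text for better matching (single-pass replacement scan)."""
--     text = text.lower().strip()
--     if text and text[-1] in '.?!':
--         text = text[:-1]
--     text = ' '.join(text.split())
--     table = [
--         ("objects", "object"),
--         ("estimate", "detect"),
--         ("physical properties", "physical property"),
--         ("identify", "detect"),
--         ("continuously", "continuous"),
--     ]
--     out = []
--     i = 0
--     n = len(text)
--     while i < n:
--         for old, new in table:
--             if text.startswith(old, i):
--                 out.append(new)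
--                 i += len(old)
--                 break
--         else:
--             out.append(text[i])
--             i += 1
--     return ''.join(out)
-- ===== Notes on version B (the rewrite author's own statement) =====
-- stated objective: alternative
-- what changed: The five sequential full-text str.replace passes are replaced by one left-to-right table-driven scan that, at each position, emits the replacement of the first matching key or copies the character, building the output in a single pass.
import Mathlib
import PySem

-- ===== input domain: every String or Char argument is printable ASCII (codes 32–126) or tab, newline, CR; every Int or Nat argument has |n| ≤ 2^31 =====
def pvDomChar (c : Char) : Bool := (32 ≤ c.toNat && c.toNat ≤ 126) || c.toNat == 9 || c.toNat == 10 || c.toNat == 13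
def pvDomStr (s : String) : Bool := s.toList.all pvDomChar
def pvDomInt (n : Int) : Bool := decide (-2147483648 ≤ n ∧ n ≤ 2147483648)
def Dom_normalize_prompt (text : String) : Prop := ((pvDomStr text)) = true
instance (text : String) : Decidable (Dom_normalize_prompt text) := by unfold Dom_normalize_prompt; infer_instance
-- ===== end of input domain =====

-- B replaces A's five sequential full-text str.replace passes by one left-to-right table-driven
-- scan; equivalence is proved outside Pre_'s overlap corner (see Pre_ below).

-- ===== PORT A =====
def normalize_prompt (text : String) : String :=
  let t1 := PySem.Str.strip (PySem.Str.lower text)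
  let t2 := if PySem.Str.endswith t1 "." || PySem.Str.endswith t1 "?" || PySem.Str.endswith t1 "!"
            then PySem.Str.slice t1 none (some (-1)) else t1
  let t3 := PySem.Str.join " " (PySem.Str.split₀ t2)
  [("objects", "object"), ("estimate", "detect"), ("physical properties", "physical property"),
   ("identify", "detect"), ("continuously", "continuous")].foldl
    (fun t p => PySem.Str.replace t p.1 p.2) t3

-- ===== PORT B =====
-- Port of Source B's single-pass scan: at each position, the first key of the table that matches
-- is replaced (the inner `for … break/else` over the 5-entry literal table is unrolled).
def pvScan (s : List Char) : List Char :=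
  match s with
  | [] => []
  | c :: rest =>
    if "objects".toList <+: (c :: rest) then "object".toList ++ pvScan (rest.drop 6)
    else if "estimate".toList <+: (c :: rest) then "detect".toList ++ pvScan (rest.drop 7)
    else if "physical properties".toList <+: (c :: rest) then "physical property".toList ++ pvScan (rest.drop 18)
    else if "identify".toList <+: (c :: rest) then "detect".toList ++ pvScan (rest.drop 7)
    else if "continuously".toList <+: (c :: rest) then "continuous".toList ++ pvScan (rest.drop 11)
    else c :: pvScan rest
termination_by s.length
decreasing_by all_goals (simp only [List.length_drop, List.length_cons]; omega)

def normalize_prompt_alt (text : String) : String :=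
  let t1 := PySem.Str.strip (PySem.Str.lower text)
  let t2 := match PySem.Str.pyGet? t1 (-1) with   -- `if text and text[-1] in '.?!'`
            | some ch => if ch ∈ ['.', '?', '!'] then PySem.Str.slice t1 none (some (-1)) else t1
            | none => t1
  let t3 := PySem.Str.join " " (PySem.Str.split₀ t2)
  String.ofList (pvScan t3.toList)

-- ===== PRECONDITION & SPEC =====
-- Pre_ excludes texts whose lowercased form contains "propertiestimate": there an occurrence of
-- the key "estimate" overlaps an occurrence of the key "physical properties", and A's fixed
-- sequential replacement order picks one of two equally defensible results (no key priority is
-- specified by the function's purpose), so neither value is the one to match.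
def Pre_normalize_prompt (text : String) : Prop :=
  PySem.Str.isIn "propertiestimate" (PySem.Str.lower text) = false
instance (text : String) : Decidable (Pre_normalize_prompt text) := by
  unfold Pre_normalize_prompt; infer_instance

def pvWitness_normalize_prompt : String := "Detect objects."

def Spec_normalize_prompt (text : String) (out : String) : Prop := out = normalize_prompt_alt text
instance (text : String) (out : String) : Decidable (Spec_normalize_prompt text out) := by
  unfold Spec_normalize_prompt; infer_instance

-- ===== CLAIM (what is proved, stated in full; the proofs are below) =====
def Claim_equal_normalize_prompt : Prop :=
  ∀ (text : String), Dom_normalize_prompt text → Pre_normalize_prompt text →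
    Spec_normalize_prompt text (normalize_prompt text)

-- ===== LEMMAS AND PROOFS =====

-- Specification recursion equivalent to Python's str.replace (left-to-right, non-overlapping).
def pvRep (old new : List Char) : List Char → List Char
  | [] => []
  | c :: rest =>
    if h : old <+: (c :: rest) ∧ old ≠ [] then
      new ++ pvRep old new ((c :: rest).drop old.length)
    else c :: pvRep old new rest
termination_by s => s.length
decreasing_by
  · have hlen : 1 ≤ old.length := by
      cases old with
      | nil => exact absurd rfl h.2
      | cons a l => simp
    simp only [List.length_drop, List.length_cons]; omega
  · simp

theorem pvRep_nil (old new : List Char) : pvRep old new [] = [] := by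
  rw [pvRep]

theorem pvRep_neg (old new : List Char) (c : Char) (rest : List Char)
    (h : ¬ old <+: (c :: rest)) :
    pvRep old new (c :: rest) = c :: pvRep old new rest := by
  rw [pvRep, dif_neg (by tauto)]

theorem pvRep_pos' (old new y : List Char) (hold : old ≠ []) :
    pvRep old new (old ++ y) = new ++ pvRep old new y := by
  cases old with
  | nil => exact absurd rfl hold
  | cons o os =>
    rw [List.cons_append, pvRep,
        dif_pos ⟨by exact List.prefix_append (o :: os) y, by simp⟩]
    congr 1
    rw [show (o :: (os ++ y)) = (o :: os) ++ y from rfl, List.drop_left]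

theorem pvRep_go_eq (old new : List Char) (hold : old ≠ []) :
    ∀ (fuel : Nat) (l acc : List Char), l.length ≤ fuel →
      PySem.Chars.replace.go old new fuel l acc = acc.reverse ++ pvRep old new l := by
  intro fuel
  induction fuel with
  | zero =>
    intro l acc hl
    have : l = [] := by
      cases l with
      | nil => rfl
      | cons a l' => simp at hl
    subst this
    rw [PySem.Chars.replace.go, pvRep_nil]
  | succ n ih =>
    intro l acc hl
    cases l with
    | nil =>
      simp [PySem.Chars.replace.go, pvRep_nil]
    | cons c t =>
      rw [PySem.Chars.replace.go]
      by_cases hp : old <+: (c :: t)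
      · rw [if_pos (by simpa [List.isPrefixOf_iff_prefix] using hp)]
        have h1 : 1 ≤ old.length := by
          cases old with
          | nil => exact absurd rfl hold
          | cons a l' => simp
        rw [ih _ _ (by simp only [List.length_drop, List.length_cons]; simp at hl; omega)]
        rw [pvRep, dif_pos ⟨hp, hold⟩]
        simp
      · rw [if_neg (by simpa [List.isPrefixOf_iff_prefix] using hp)]
        rw [ih _ _ (by simp at hl ⊢; omega)]
        rw [pvRep_neg _ _ _ _ hp]
        simp

theorem pvReplace_eq (old new s : List Char) (hold : old ≠ []) :
    PySem.Chars.replace s old new = pvRep old new s := by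
  rw [PySem.Chars.replace, if_neg (by simpa using hold)]
  simpa using pvRep_go_eq old new hold s.length s [] le_rfl

-- Peeling a replace through a concrete block it cannot touch.
theorem pvRep_peel (old new : List Char) (hold : old ≠ []) (pre : List Char)
    (hpre : ∀ i, i < pre.length → ¬ (old <+: pre.drop i) ∧ ¬ (pre.drop i <+: old)) :
    ∀ y, pvRep old new (pre ++ y) = pre ++ pvRep old new y := by
  induction pre with
  | nil => intro y; simp
  | cons c pre' ih =>
    intro y
    have hng : ¬ old <+: (c :: (pre' ++ y)) := by
      intro hcon
      have h2 : (c :: pre') <+: (c :: pre') ++ y := List.prefix_append _ _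
      rcases List.prefix_or_prefix_of_prefix (by simpa using hcon) h2 with h | h
      · exact (hpre 0 (by simp)).1 (by simpa using h)
      · exact (hpre 0 (by simp)).2 (by simpa using h)
    rw [List.cons_append, pvRep_neg _ _ _ _ hng,
        ih (fun i hi => hpre (i + 1) (by simpa using Nat.succ_lt_succ hi))]
    rfl

-- Reflecting a prefix back through a replace whose output cannot overlap it.
theorem pvRep_reflect (old new pat : List Char)
    (h : ∀ i, i < pat.length → ¬ (pat.drop i <+: new) ∧ ¬ (new <+: pat.drop i)) :
    ∀ (n : Nat) (y : List Char), y.length ≤ n → ∀ i,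
      pat.drop i <+: pvRep old new y → pat.drop i <+: y := by
  intro n
  induction n with
  | zero =>
    intro y hy i hp
    have : y = [] := by
      cases y with
      | nil => rfl
      | cons a l => simp at hy
    subst this
    rw [pvRep_nil] at hp
    simpa using hp
  | succ n ih =>
    intro y hy i hp
    cases y with
    | nil => rw [pvRep_nil] at hp; simpa using hp
    | cons c rest =>
      by_cases hg : old <+: (c :: rest) ∧ old ≠ []
      · rw [pvRep, dif_pos hg] at hp
        by_cases hi : i < pat.length
        · rcases List.prefix_or_prefix_of_prefix hp (List.prefix_append new _) with h1 | h1
          · exact absurd h1 (h i hi).1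
          · exact absurd h1 (h i hi).2
        · rw [List.drop_eq_nil_of_le (by omega)]
          exact List.nil_prefix
      · rw [pvRep, dif_neg hg] at hp
        cases hd : pat.drop i with
        | nil => exact List.nil_prefix
        | cons p ps =>
          rw [hd, List.cons_prefix_cons] at hp
          obtain ⟨rfl, hps⟩ := hp
          have hps' : pat.drop (i + 1) = ps := by
            rw [← List.tail_drop, hd]
            rfl
          have := ih rest (by simp at hy; omega) (i + 1) (by rw [hps']; exact hps)
          exact List.cons_prefix_cons.mpr ⟨rfl, hps' ▸ this⟩

-- The five-pass composite (A's replacement stage).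
def pvChain (s : List Char) : List Char :=
  pvRep "continuously".toList "continuous".toList
    (pvRep "identify".toList "detect".toList
      (pvRep "physical properties".toList "physical property".toList
        (pvRep "estimate".toList "detect".toList
          (pvRep "objects".toList "object".toList s))))

-- pvScan branch equations.
theorem pvScan_nil : pvScan [] = [] := by rw [pvScan]

theorem pvScan_k1 (y : List Char) :
    pvScan ("objects".toList ++ y) = "object".toList ++ pvScan y := by
  rw [show "objects".toList ++ y = 'o'::'b'::'j'::'e'::'c'::'t'::'s'::y from rfl, pvScan,
      if_pos (show "objects".toList <+: 'o'::'b'::'j'::'e'::'c'::'t'::'s'::y from ⟨y, rfl⟩)]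
  rfl

theorem pvScan_k2 (y : List Char) :
    pvScan ("estimate".toList ++ y) = "detect".toList ++ pvScan y := by
  rw [show "estimate".toList ++ y = 'e'::'s'::'t'::'i'::'m'::'a'::'t'::'e'::y from rfl, pvScan,
      if_neg (by simp [show "objects".toList = ['o','b','j','e','c','t','s'] from rfl,
                       List.cons_prefix_cons]),
      if_pos (show "estimate".toList <+: 'e'::'s'::'t'::'i'::'m'::'a'::'t'::'e'::y from ⟨y, rfl⟩)]
  rfl

theorem pvScan_k3 (y : List Char) :
    pvScan ("physical properties".toList ++ y) = "physical property".toList ++ pvScan y := by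
  rw [show "physical properties".toList ++ y =
        'p'::'h'::'y'::'s'::'i'::'c'::'a'::'l'::' '::'p'::'r'::'o'::'p'::'e'::'r'::'t'::'i'::'e'::'s'::y from rfl,
      pvScan,
      if_neg (by simp [show "objects".toList = ['o','b','j','e','c','t','s'] from rfl,
                       List.cons_prefix_cons]),
      if_neg (by simp [show "estimate".toList = ['e','s','t','i','m','a','t','e'] from rfl,
                       List.cons_prefix_cons]),
      if_pos (show "physical properties".toList <+:
        'p'::'h'::'y'::'s'::'i'::'c'::'a'::'l'::' '::'p'::'r'::'o'::'p'::'e'::'r'::'t'::'i'::'e'::'s'::y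
        from ⟨y, rfl⟩)]
  rfl

theorem pvScan_k4 (y : List Char) :
    pvScan ("identify".toList ++ y) = "detect".toList ++ pvScan y := by
  rw [show "identify".toList ++ y = 'i'::'d'::'e'::'n'::'t'::'i'::'f'::'y'::y from rfl, pvScan,
      if_neg (by simp [show "objects".toList = ['o','b','j','e','c','t','s'] from rfl,
                       List.cons_prefix_cons]),
      if_neg (by simp [show "estimate".toList = ['e','s','t','i','m','a','t','e'] from rfl,
                       List.cons_prefix_cons]),
      if_neg (by simp [show "physical properties".toList =
                       ['p','h','y','s','i','c','a','l',' ','p','r','o','p','e','r','t','i','e','s'] from rfl,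
                       List.cons_prefix_cons]),
      if_pos (show "identify".toList <+: 'i'::'d'::'e'::'n'::'t'::'i'::'f'::'y'::y from ⟨y, rfl⟩)]
  rfl

theorem pvScan_k5 (y : List Char) :
    pvScan ("continuously".toList ++ y) = "continuous".toList ++ pvScan y := by
  rw [show "continuously".toList ++ y = 'c'::'o'::'n'::'t'::'i'::'n'::'u'::'o'::'u'::'s'::'l'::'y'::y from rfl,
      pvScan,
      if_neg (by simp [show "objects".toList = ['o','b','j','e','c','t','s'] from rfl,
                       List.cons_prefix_cons]),
      if_neg (by simp [show "estimate".toList = ['e','s','t','i','m','a','t','e'] from rfl,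
                       List.cons_prefix_cons]),
      if_neg (by simp [show "physical properties".toList =
                       ['p','h','y','s','i','c','a','l',' ','p','r','o','p','e','r','t','i','e','s'] from rfl,
                       List.cons_prefix_cons]),
      if_neg (by simp [show "identify".toList = ['i','d','e','n','t','i','f','y'] from rfl,
                       List.cons_prefix_cons]),
      if_pos (show "continuously".toList <+:
        'c'::'o'::'n'::'t'::'i'::'n'::'u'::'o'::'u'::'s'::'l'::'y'::y from ⟨y, rfl⟩)]
  rfl

theorem pvScan_cons_neg (c : Char) (rest : List Char)
    (h1 : ¬ "objects".toList <+: (c :: rest))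
    (h2 : ¬ "estimate".toList <+: (c :: rest))
    (h3 : ¬ "physical properties".toList <+: (c :: rest))
    (h4 : ¬ "identify".toList <+: (c :: rest))
    (h5 : ¬ "continuously".toList <+: (c :: rest)) :
    pvScan (c :: rest) = c :: pvScan rest := by
  rw [pvScan, if_neg h1, if_neg h2, if_neg h3, if_neg h4, if_neg h5]

-- Main: the five sequential passes equal the single scan on overlap-free input.
theorem pvMain : ∀ (n : Nat) (s : List Char), s.length ≤ n →
    ¬ ("propertiestimate".toList <:+: s) → pvChain s = pvScan s := by
  intro n
  induction n with
  | zero =>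
    intro s hs _
    have : s = [] := by
      cases s with
      | nil => rfl
      | cons a l => simp at hs
    subst this
    simp [pvChain, pvRep_nil, pvScan_nil]
  | succ n ih =>
    intro s hs hinf
    cases s with
    | nil => simp [pvChain, pvRep_nil, pvScan_nil]
    | cons c rest =>
      by_cases h1 : "objects".toList <+: (c :: rest)
      · obtain ⟨y, hy⟩ := h1
        rw [← hy] at hinf hs ⊢
        have hny : y.length ≤ n := by
          have : ("objects".toList).length = 7 := rfl
          simp [List.length_append, this] at hs; omega
        have hinfy : ¬ ("propertiestimate".toList <:+: y) :=
          fun hc => hinf (hc.trans ⟨"objects".toList, [], by simp⟩)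
        have hstep : pvChain ("objects".toList ++ y) = "object".toList ++ pvChain y := by
          simp only [pvChain]
          rw [pvRep_pos' _ _ _ (by decide),
              pvRep_peel "estimate".toList "detect".toList (by decide) "object".toList (by decide),
              pvRep_peel "physical properties".toList "physical property".toList (by decide)
                "object".toList (by decide),
              pvRep_peel "identify".toList "detect".toList (by decide) "object".toList (by decide),
              pvRep_peel "continuously".toList "continuous".toList (by decide) "object".toList (by decide)]
        rw [hstep, pvScan_k1, ih y hny hinfy]
      · by_cases h2 : "estimate".toList <+: (c :: rest)
        · obtain ⟨y, hy⟩ := h2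
          rw [← hy] at hinf hs ⊢
          have hny : y.length ≤ n := by
            have : ("estimate".toList).length = 8 := rfl
            simp [List.length_append, this] at hs; omega
          have hinfy : ¬ ("propertiestimate".toList <:+: y) :=
            fun hc => hinf (hc.trans ⟨"estimate".toList, [], by simp⟩)
          have hstep : pvChain ("estimate".toList ++ y) = "detect".toList ++ pvChain y := by
            simp only [pvChain]
            rw [pvRep_peel "objects".toList "object".toList (by decide) "estimate".toList (by decide),
                pvRep_pos' _ _ _ (by decide),
                pvRep_peel "physical properties".toList "physical property".toList (by decide)
                  "detect".toList (by decide),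
                pvRep_peel "identify".toList "detect".toList (by decide) "detect".toList (by decide),
                pvRep_peel "continuously".toList "continuous".toList (by decide) "detect".toList (by decide)]
          rw [hstep, pvScan_k2, ih y hny hinfy]
        · by_cases h3 : "physical properties".toList <+: (c :: rest)
          · obtain ⟨y, hy⟩ := h3
            rw [← hy] at hinf hs ⊢
            have hny : y.length ≤ n := by
              have : ("physical properties".toList).length = 19 := rfl
              simp [List.length_append, this] at hs; omega
            have hinfy : ¬ ("propertiestimate".toList <:+: y) :=
              fun hc => hinf (hc.trans ⟨"physical properties".toList, [], by simp⟩)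
            have hty : ¬ ("timate".toList <+: y) := by
              intro hc
              obtain ⟨y', hy'⟩ := hc
              rw [← hy'] at hinf
              exact hinf ⟨"physical ".toList, y', rfl⟩
            have hstep : pvChain ("physical properties".toList ++ y) =
                "physical property".toList ++ pvChain y := by
              simp only [pvChain]
              rw [pvRep_peel "objects".toList "object".toList (by decide)
                    "physical properties".toList (by decide)]
              rw [show ("physical properties".toList ++
                    pvRep "objects".toList "object".toList y) =
                  "physical properti".toList ++ ('e'::'s'::pvRep "objects".toList "object".toList y)
                  from rfl]
              rw [pvRep_peel "estimate".toList "detect".toList (by decide)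
                    "physical properti".toList (by decide)]
              rw [pvRep_neg _ _ _ _ (by
                    intro hc
                    rw [show "estimate".toList = 'e'::'s'::"timate".toList from rfl,
                        List.cons_prefix_cons] at hc
                    obtain ⟨-, hc⟩ := hc
                    rw [List.cons_prefix_cons] at hc
                    obtain ⟨-, hc⟩ := hc
                    have := pvRep_reflect "objects".toList "object".toList "timate".toList
                      (by decide) y.length y le_rfl 0 (by simpa using hc)
                    exact hty (by simpa using this))]
              rw [pvRep_neg _ _ _ _ (by
                    simp [show "estimate".toList = ['e','s','t','i','m','a','t','e'] from rfl,
                          List.cons_prefix_cons])]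
              rw [show ("physical properti".toList ++
                    ('e'::'s'::pvRep "estimate".toList "detect".toList
                      (pvRep "objects".toList "object".toList y))) =
                  "physical properties".toList ++
                    pvRep "estimate".toList "detect".toList
                      (pvRep "objects".toList "object".toList y) from rfl]
              rw [pvRep_pos' _ _ _ (by decide),
                  pvRep_peel "identify".toList "detect".toList (by decide)
                    "physical property".toList (by decide),
                  pvRep_peel "continuously".toList "continuous".toList (by decide)
                    "physical property".toList (by decide)]
            rw [hstep, pvScan_k3, ih y hny hinfy]
          · by_cases h4 : "identify".toList <+: (c :: rest)
            · obtain ⟨y, hy⟩ := h4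
              rw [← hy] at hinf hs ⊢
              have hny : y.length ≤ n := by
                have : ("identify".toList).length = 8 := rfl
                simp [List.length_append, this] at hs; omega
              have hinfy : ¬ ("propertiestimate".toList <:+: y) :=
                fun hc => hinf (hc.trans ⟨"identify".toList, [], by simp⟩)
              have hstep : pvChain ("identify".toList ++ y) = "detect".toList ++ pvChain y := by
                simp only [pvChain]
                rw [pvRep_peel "objects".toList "object".toList (by decide) "identify".toList (by decide),
                    pvRep_peel "estimate".toList "detect".toList (by decide) "identify".toList (by decide),
                    pvRep_peel "physical properties".toList "physical property".toList (by decide)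
                      "identify".toList (by decide),
                    pvRep_pos' _ _ _ (by decide),
                    pvRep_peel "continuously".toList "continuous".toList (by decide)
                      "detect".toList (by decide)]
              rw [hstep, pvScan_k4, ih y hny hinfy]
            · by_cases h5 : "continuously".toList <+: (c :: rest)
              · obtain ⟨y, hy⟩ := h5
                rw [← hy] at hinf hs ⊢
                have hny : y.length ≤ n := by
                  have : ("continuously".toList).length = 12 := rfl
                  simp [List.length_append, this] at hs; omega
                have hinfy : ¬ ("propertiestimate".toList <:+: y) :=
                  fun hc => hinf (hc.trans ⟨"continuously".toList, [], by simp⟩)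
                have hstep : pvChain ("continuously".toList ++ y) =
                    "continuous".toList ++ pvChain y := by
                  simp only [pvChain]
                  rw [pvRep_peel "objects".toList "object".toList (by decide)
                        "continuously".toList (by decide),
                      pvRep_peel "estimate".toList "detect".toList (by decide)
                        "continuously".toList (by decide),
                      pvRep_peel "physical properties".toList "physical property".toList (by decide)
                        "continuously".toList (by decide),
                      pvRep_peel "identify".toList "detect".toList (by decide)
                        "continuously".toList (by decide),
                      pvRep_pos' _ _ _ (by decide)]
                rw [hstep, pvScan_k5, ih y hny hinfy]
              · -- no key matches at this position
                have hny : rest.length ≤ n := by simp at hs; omega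
                have hinfy : ¬ ("propertiestimate".toList <:+: rest) :=
                  fun hc => hinf (hc.trans ⟨[c], [], by simp⟩)
                have g2 : ¬ "estimate".toList <+:
                    (c :: pvRep "objects".toList "object".toList rest) := by
                  intro hc
                  rw [show "estimate".toList = 'e'::"stimate".toList from rfl,
                      List.cons_prefix_cons] at hc
                  obtain ⟨rfl, hc⟩ := hc
                  have := pvRep_reflect "objects".toList "object".toList "stimate".toList
                    (by decide) rest.length rest le_rfl 0 (by simpa using hc)
                  exact h2 (by
                    rw [show "estimate".toList = 'e'::"stimate".toList from rfl,
                        List.cons_prefix_cons]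
                    exact ⟨rfl, by simpa using this⟩)
                have g3 : ¬ "physical properties".toList <+:
                    (c :: pvRep "estimate".toList "detect".toList
                      (pvRep "objects".toList "object".toList rest)) := by
                  intro hc
                  rw [show "physical properties".toList = 'p'::"hysical properties".toList from rfl,
                      List.cons_prefix_cons] at hc
                  obtain ⟨rfl, hc⟩ := hc
                  have r1 := pvRep_reflect "estimate".toList "detect".toList
                    "hysical properties".toList (by decide) _ _ le_rfl 0 (by simpa using hc)
                  have r2 := pvRep_reflect "objects".toList "object".toList
                    "hysical properties".toList (by decide) rest.length rest le_rfl 0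
                    (by simpa using r1)
                  exact h3 (by
                    rw [show "physical properties".toList = 'p'::"hysical properties".toList from rfl,
                        List.cons_prefix_cons]
                    exact ⟨rfl, by simpa using r2⟩)
                have g4 : ¬ "identify".toList <+:
                    (c :: pvRep "physical properties".toList "physical property".toList
                      (pvRep "estimate".toList "detect".toList
                        (pvRep "objects".toList "object".toList rest))) := by
                  intro hc
                  rw [show "identify".toList = 'i'::"dentify".toList from rfl,
                      List.cons_prefix_cons] at hc
                  obtain ⟨rfl, hc⟩ := hc
                  have r1 := pvRep_reflect "physical properties".toList "physical property".toList
                    "dentify".toList (by decide) _ _ le_rfl 0 (by simpa using hc)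
                  have r2 := pvRep_reflect "estimate".toList "detect".toList
                    "dentify".toList (by decide) _ _ le_rfl 0 (by simpa using r1)
                  have r3 := pvRep_reflect "objects".toList "object".toList
                    "dentify".toList (by decide) rest.length rest le_rfl 0 (by simpa using r2)
                  exact h4 (by
                    rw [show "identify".toList = 'i'::"dentify".toList from rfl,
                        List.cons_prefix_cons]
                    exact ⟨rfl, by simpa using r3⟩)
                have g5 : ¬ "continuously".toList <+:
                    (c :: pvRep "identify".toList "detect".toList
                      (pvRep "physical properties".toList "physical property".toList
                        (pvRep "estimate".toList "detect".toList
                          (pvRep "objects".toList "object".toList rest)))) := by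
                  intro hc
                  rw [show "continuously".toList = 'c'::"ontinuously".toList from rfl,
                      List.cons_prefix_cons] at hc
                  obtain ⟨rfl, hc⟩ := hc
                  have r1 := pvRep_reflect "identify".toList "detect".toList
                    "ontinuously".toList (by decide) _ _ le_rfl 0 (by simpa using hc)
                  have r2 := pvRep_reflect "physical properties".toList "physical property".toList
                    "ontinuously".toList (by decide) _ _ le_rfl 0 (by simpa using r1)
                  have r3 := pvRep_reflect "estimate".toList "detect".toList
                    "ontinuously".toList (by decide) _ _ le_rfl 0 (by simpa using r2)
                  have r4 := pvRep_reflect "objects".toList "object".toList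
                    "ontinuously".toList (by decide) rest.length rest le_rfl 0 (by simpa using r3)
                  exact h5 (by
                    rw [show "continuously".toList = 'c'::"ontinuously".toList from rfl,
                        List.cons_prefix_cons]
                    exact ⟨rfl, by simpa using r4⟩)
                have hstep : pvChain (c :: rest) = c :: pvChain rest := by
                  simp only [pvChain]
                  rw [pvRep_neg _ _ _ _ h1, pvRep_neg _ _ _ _ g2, pvRep_neg _ _ _ _ g3,
                      pvRep_neg _ _ _ _ g4, pvRep_neg _ _ _ _ g5]
                rw [hstep, pvScan_cons_neg c rest h1 h2 h3 h4 h5, ih rest hny hinfy]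

-- split₀ words are infixes of the input.
theorem pvSplitGo_mem : ∀ (l cur : List Char) (acc : List (List Char)) (w : List Char),
    w ∈ PySem.Chars.split₀.go l cur acc →
    w ∈ acc ∨ (∃ u, u <+: l ∧ w = cur.reverse ++ u) ∨ w <:+: l := by
  intro l
  induction l with
  | nil =>
    intro cur acc w hw
    rw [PySem.Chars.split₀.go] at hw
    by_cases hc : cur.isEmpty = true
    · rw [if_pos hc] at hw
      exact Or.inl (by simpa using hw)
    · rw [if_neg hc] at hw
      simp at hw
      rcases hw with hw | hw
      · exact Or.inl hw
      · exact Or.inr (Or.inl ⟨[], by simp, by simpa using hw⟩)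
  | cons c rest ih =>
    intro cur acc w hw
    rw [PySem.Chars.split₀.go] at hw
    by_cases hsp : PySem.Chars.isspace c = true
    · rw [if_pos hsp] at hw
      by_cases hc : cur.isEmpty = true
      · rw [if_pos hc] at hw
        rcases ih [] acc w hw with h | ⟨u, hu, hwu⟩ | h
        · exact Or.inl h
        · exact Or.inr (Or.inr (by
            rw [hwu]; simp
            exact (hu.isInfix).trans ⟨[c], [], by simp⟩))
        · exact Or.inr (Or.inr (h.trans ⟨[c], [], by simp⟩))
      · rw [if_neg hc] at hw
        rcases ih [] (cur.reverse :: acc) w hw with h | ⟨u, hu, hwu⟩ | h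
        · rcases List.mem_cons.mp h with h | h
          · exact Or.inr (Or.inl ⟨[], List.nil_prefix, by simpa using h⟩)
          · exact Or.inl h
        · exact Or.inr (Or.inr (by
            rw [hwu]; simp
            exact (hu.isInfix).trans ⟨[c], [], by simp⟩))
        · exact Or.inr (Or.inr (h.trans ⟨[c], [], by simp⟩))
    · rw [if_neg hsp] at hw
      rcases ih (c :: cur) acc w hw with h | ⟨u, hu, hwu⟩ | h
      · exact Or.inl h
      · refine Or.inr (Or.inl ⟨c :: u, ?_, ?_⟩)
        · exact List.cons_prefix_cons.mpr ⟨rfl, hu⟩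
        · rw [hwu]; simp
      · exact Or.inr (Or.inr (h.trans ⟨[c], [], by simp⟩))

theorem pvSplit_word_infix (t w : List Char) (hw : w ∈ PySem.Chars.split₀ t) : w <:+: t := by
  rcases pvSplitGo_mem t [] [] w (by simpa [PySem.Chars.split₀] using hw) with h | ⟨u, hu, hwu⟩ | h
  · simp at h
  · rw [hwu]; simpa using hu.isInfix
  · exact h

-- An infix avoiding a separator element lies on one side of it.
theorem pvInfix_split (pat a b : List Char) (x : Char) (hx : x ∉ pat)
    (h : pat <:+: a ++ x :: b) : pat <:+: a ∨ pat <:+: b := by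
  obtain ⟨u, v, huv⟩ := h
  by_cases hc1 : u.length + pat.length ≤ a.length
  · left
    have hul : u.length ≤ a.length := by omega
    have ht : u ++ pat ++ v.take (a.length - u.length - pat.length) = a := by
      have h0 := congrArg (List.take a.length) huv
      rw [List.take_left] at h0
      rw [List.append_assoc, List.take_append,
          List.take_of_length_le hul,
          List.take_append,
          List.take_of_length_le (by omega)] at h0
      rw [← List.append_assoc] at h0
      exact h0
    exact ⟨u, v.take (a.length - u.length - pat.length), ht⟩
  · by_cases hc2 : a.length + 1 ≤ u.length
    · right
      have hd : u.drop (a.length + 1) ++ pat ++ v = b := by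
        have h0 := congrArg (List.drop (a.length + 1)) huv
        rw [List.append_assoc, List.drop_append,
            show a.length + 1 - u.length = 0 from by omega, List.drop_zero] at h0
        rw [show a ++ x :: b = (a ++ [x]) ++ b from by simp] at h0
        rw [show ((a ++ [x]) ++ b).drop (a.length + 1) = b from by
              have hlen : (a ++ [x]).length = a.length + 1 := by simp
              rw [← hlen, List.drop_left]] at h0
        rw [← List.append_assoc] at h0
        exact h0
      exact ⟨u.drop (a.length + 1), v, hd⟩
    · exfalso
      have hlu : u.length ≤ a.length := by omega
      have h1 : (a ++ x :: b)[a.length]? = some x := by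
        rw [List.getElem?_append_right (le_refl a.length)]
        simp
      have h2 : (u ++ pat ++ v)[a.length]? = pat[a.length - u.length]? := by
        rw [List.append_assoc, List.getElem?_append_right hlu,
            List.getElem?_append_left (by omega)]
      rw [huv, h1] at h2
      have hmem : x ∈ pat := List.mem_of_getElem? h2.symm
      exact hx hmem

-- A space-free nonempty infix of an intercalation lies inside one part.
theorem pvInfix_intercalate (pat : List Char) (hp : pat ≠ []) (hx : ' ' ∉ pat) :
    ∀ ws : List (List Char), pat <:+: [' '].intercalate ws → ∃ w ∈ ws, pat <:+: w := by
  intro ws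
  induction ws with
  | nil =>
    intro h
    simp [List.intercalate] at h
    exact absurd h hp
  | cons w ws' ih =>
    intro h
    cases ws' with
    | nil =>
      refine ⟨w, by simp, ?_⟩
      simpa [List.intercalate] using h
    | cons w2 ws'' =>
      rw [show [' '].intercalate (w :: w2 :: ws'') = w ++ ' ' :: [' '].intercalate (w2 :: ws'')
          from by simp [List.intercalate]] at h
      rcases pvInfix_split pat w _ ' ' hx h with h | h
      · exact ⟨w, by simp, h⟩
      · obtain ⟨w', hw', hw'2⟩ := ih h
        exact ⟨w', by simp [hw'], hw'2⟩

theorem pvStrip_infix (s : List Char) : PySem.Chars.strip s <:+: s := by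
  have h1 : PySem.Chars.lstrip s <:+ s := List.dropWhile_suffix _
  have h2 : PySem.Chars.rstrip (PySem.Chars.lstrip s) <+: PySem.Chars.lstrip s := by
    rw [PySem.Chars.rstrip]
    have h := List.dropWhile_suffix (l := (PySem.Chars.lstrip s).reverse) PySem.Chars.isspace
    have h3 := List.reverse_prefix.mpr h
    simpa using h3
  show PySem.Chars.rstrip (PySem.Chars.lstrip s) <:+: s
  exact (h2.isInfix).trans h1.isInfix

theorem pvEndswithConcat (ys : List Char) (c d : Char) :
    PySem.Chars.endswith (ys ++ [c]) [d] = (c == d) := by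
  by_cases h : c = d
  · subst h
    simp [PySem.Chars.endswith, List.isSuffixOf_iff_suffix, List.suffix_append]
  · have hns : ¬ ([d] <:+ ys ++ [c]) := by
      intro hc
      obtain ⟨p, hp⟩ := hc
      have := congrArg List.getLast? hp
      simp at this
      exact h this.symm
    have hcd : (c == d) = false := by simp [h]
    rw [hcd]
    cases hbv : [d].isSuffixOf (ys ++ [c]) with
    | false => simp [PySem.Chars.endswith, hbv]
    | true => exact absurd (by simpa [List.isSuffixOf_iff_suffix] using hbv) hns

-- The trailing-punctuation steps of A and B agree.
theorem pvStep2_eq (t1 : String) :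
    (if PySem.Str.endswith t1 "." || PySem.Str.endswith t1 "?" || PySem.Str.endswith t1 "!"
     then PySem.Str.slice t1 none (some (-1)) else t1)
    = (match PySem.Str.pyGet? t1 (-1) with
       | some ch => if ch ∈ ['.', '?', '!'] then PySem.Str.slice t1 none (some (-1)) else t1
       | none => t1) := by
  have hb : PySem.Str.pyGet? t1 (-1) = t1.toList.getLast? := by
    rw [PySem.Str.pyGet?_eq]
    simp [PySem.Chars.pyGet?, PySem.List.pyGet?_neg_one]
  rw [hb]
  cases hl : t1.toList.getLast? with
  | none =>
    have ht : t1.toList = [] := by simpa using hl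
    rw [if_neg (by simp [PySem.Str.endswith_eq, ht, PySem.Chars.endswith])]
  | some ch =>
    obtain ⟨ys, hys⟩ := List.getLast?_eq_some_iff.mp hl
    have he : ∀ d : Char, PySem.Chars.endswith t1.toList [d] = (ch == d) := by
      intro d; rw [hys]; exact pvEndswithConcat ys ch d
    rw [show PySem.Str.endswith t1 "." = PySem.Chars.endswith t1.toList ['.'] from by
          simp [PySem.Str.endswith_eq],
        show PySem.Str.endswith t1 "?" = PySem.Chars.endswith t1.toList ['?'] from by
          simp [PySem.Str.endswith_eq],
        show PySem.Str.endswith t1 "!" = PySem.Chars.endswith t1.toList ['!'] from by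
          simp [PySem.Str.endswith_eq],
        he, he, he]
    by_cases h : ch = '.' ∨ ch = '?' ∨ ch = '!'
    · rcases h with rfl | rfl | rfl <;> simp
    · push_neg at h
      obtain ⟨hd1, hd2, hd3⟩ := h
      simp [hd1, hd2, hd3]

-- t2 (after punctuation trimming) is an infix of t1.
theorem pvT2_infix (t1 : String) :
    (match PySem.Str.pyGet? t1 (-1) with
     | some ch => if ch ∈ ['.', '?', '!'] then PySem.Str.slice t1 none (some (-1)) else t1
     | none => t1).toList <:+: t1.toList := by
  cases h : PySem.Str.pyGet? t1 (-1) with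
  | none => simp
  | some ch =>
    simp only []
    by_cases hm : ch ∈ ['.', '?', '!']
    · rw [if_pos hm]
      have hs : (PySem.Str.slice t1 none (some (-1))).toList = t1.toList.dropLast := by
        rw [PySem.Str.toList_slice]
        simp [pysem]
      rw [hs]
      exact (List.dropLast_prefix _).isInfix
    · rw [if_neg hm]

-- The replacement stage: A's foldl of replaces equals B's scan, given no overlap.
theorem pvPipeline (t2 : String)
    (hinf : ¬ ("propertiestimate".toList <:+: t2.toList)) :
    List.foldl (fun t p => PySem.Str.replace t p.1 p.2)
      (PySem.Str.join " " (PySem.Str.split₀ t2))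
      [("objects", "object"), ("estimate", "detect"),
       ("physical properties", "physical property"),
       ("identify", "detect"), ("continuously", "continuous")]
    = String.ofList (pvScan (PySem.Str.join " " (PySem.Str.split₀ t2)).toList) := by
  apply String.toList_inj.mp
  simp only [List.foldl_cons, List.foldl_nil]
  simp only [PySem.Str.toList_replace]
  rw [pvReplace_eq _ _ _ (by decide), pvReplace_eq _ _ _ (by decide),
      pvReplace_eq _ _ _ (by decide), pvReplace_eq _ _ _ (by decide),
      pvReplace_eq _ _ _ (by decide)]
  rw [show (String.ofList (pvScan (PySem.Str.join " " (PySem.Str.split₀ t2)).toList)).toList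
        = pvScan (PySem.Str.join " " (PySem.Str.split₀ t2)).toList from by simp]
  have hjoin : (PySem.Str.join " " (PySem.Str.split₀ t2)).toList
      = PySem.Chars.join [' '] (PySem.Chars.split₀ t2.toList) := by
    rw [PySem.Str.toList_join, PySem.Str.split₀_map_toList]
    rfl
  have hinv : ¬ ("propertiestimate".toList <:+:
      (PySem.Str.join " " (PySem.Str.split₀ t2)).toList) := by
    intro hcon
    rw [hjoin] at hcon
    obtain ⟨w, hw, hprw⟩ := pvInfix_intercalate "propertiestimate".toList (by decide) (by decide)
      (PySem.Chars.split₀ t2.toList) (by simpa [PySem.Chars.join] using hcon)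
    exact hinf ((hprw.trans (pvSplit_word_infix _ _ hw)).trans
      (by exact List.infix_rfl))
  exact pvMain ((PySem.Str.join " " (PySem.Str.split₀ t2)).toList).length _ le_rfl hinv

-- ===== VERDICT (by name: the statement is the Claim_ definition above) =====
theorem normalize_prompt_spec : Claim_equal_normalize_prompt := by
  unfold Claim_equal_normalize_prompt Spec_normalize_prompt
  intro text _hdom hpre
  unfold normalize_prompt normalize_prompt_alt
  simp only []
  rw [pvStep2_eq]
  apply pvPipeline
  intro hcon
  have ht1 : ("propertiestimate".toList <:+: (PySem.Str.strip (PySem.Str.lower text)).toList) :=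
    hcon.trans (pvT2_infix (PySem.Str.strip (PySem.Str.lower text)))
  have hb : (PySem.Str.strip (PySem.Str.lower text)).toList
      = PySem.Chars.strip (PySem.Chars.lower text.toList) := by
    rw [PySem.Str.toList_strip, PySem.Str.toList_lower]
  rw [hb] at ht1
  have hlow : ("propertiestimate".toList <:+: PySem.Chars.lower text.toList) :=
    ht1.trans (pvStrip_infix _)
  have : PySem.Str.isIn "propertiestimate" (PySem.Str.lower text) = true :=
    (PySem.Str.isIn_iff_infix _ _).mpr (by rw [PySem.Str.toList_lower]; exact hlow)
  have hpre' : PySem.Str.isIn "propertiestimate" (PySem.Str.lower text) = false := hpre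
  rw [hpre'] at this
  exact Bool.false_ne_true this
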